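-- pv_equiv track=rewrite | github.com/gowdakiran17/astro360-2 | astro_app/backend/engine/analyzers/compatibility_analyzer.py | _are_compatible_signs
-- ===== SOURCE A (Python) =====
-- def _are_compatible_signs(s1, s2):
--     # Fire/Air compatible, Earth/Water compatible
--     elements = {
--         "Fire": ["Aries", "Leo", "Sagittarius"],
--         "Earth": ["Taurus", "Virgo", "Capricorn"],
--         "Air": ["Gemini", "Libra", "Aquarius"],
--         "Water": ["Cancer", "Scorpio", "Pisces"]
--     }
--     e1 = next((e for e, signs in elements.items() if s1 in signs), None)
--     e2 = next((e for e, signs in elements.items() if s2 in signs), None)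
--
--     if not e1 or not e2: return False
--     if e1 == e2: return True
--     if (e1 in ["Fire", "Air"] and e2 in ["Fire", "Air"]): return True
--     if (e1 in ["Earth", "Water"] and e2 in ["Earth", "Water"]): return True
--     return False
-- ===== SOURCE B (Python) =====
-- _GROUP = {
--     "Aries": 0, "Leo": 0, "Sagittarius": 0,
--     "Gemini": 0, "Libra": 0, "Aquarius": 0,
--     "Taurus": 1, "Virgo": 1, "Capricorn": 1,
--     "Cancer": 1, "Scorpio": 1, "Pisces": 1,
-- }
--
-- def _are_compatible_signs(s1, s2):
--     g1 = _GROUP.get(s1)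
--     g2 = _GROUP.get(s2)
--     return g1 is not None and g1 == g2
-- ===== Notes on version B (the rewrite author's own statement) =====
-- stated objective: simpler
-- what changed: Replaces the element-scan over a dict of sign lists plus a four-branch compatibility ladder by a single flat sign-to-polarity-group dict (Fire/Air=0, Earth/Water=1) with two lookups and one comparison.
import Mathlib
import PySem

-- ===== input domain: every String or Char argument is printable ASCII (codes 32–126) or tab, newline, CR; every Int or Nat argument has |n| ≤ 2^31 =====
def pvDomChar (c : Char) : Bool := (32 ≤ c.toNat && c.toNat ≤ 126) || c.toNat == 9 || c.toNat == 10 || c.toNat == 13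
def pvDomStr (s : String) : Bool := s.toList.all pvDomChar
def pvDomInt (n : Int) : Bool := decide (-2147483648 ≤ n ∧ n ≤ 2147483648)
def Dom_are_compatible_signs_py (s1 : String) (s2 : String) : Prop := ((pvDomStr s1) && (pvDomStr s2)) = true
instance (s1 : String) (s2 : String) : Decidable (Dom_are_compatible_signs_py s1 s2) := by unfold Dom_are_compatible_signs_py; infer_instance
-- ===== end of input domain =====

-- B replaces A's element-scan plus branch ladder by one flat sign-to-group dict with two lookups (objective: simpler).

-- ===== PORT A =====
def pvElements : List (String × List String) :=
  [("Fire", ["Aries", "Leo", "Sagittarius"]),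
   ("Earth", ["Taurus", "Virgo", "Capricorn"]),
   ("Air", ["Gemini", "Libra", "Aquarius"]),
   ("Water", ["Cancer", "Scorpio", "Pisces"])]

def are_compatible_signs_py (s1 : String) (s2 : String) : Bool :=
  let e1 := (pvElements.find? (fun p => p.2.contains s1)).map (·.1)
  let e2 := (pvElements.find? (fun p => p.2.contains s2)).map (·.1)
  match e1, e2 with
  | some a, some b =>
      if a == b then true
      else if (["Fire", "Air"].contains a && ["Fire", "Air"].contains b) then true
      else if (["Earth", "Water"].contains a && ["Earth", "Water"].contains b) then true
      else false
  | _, _ => false   -- "if not e1 or not e2: return False" (element names are nonempty, so falsy = None)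

-- ===== PORT B =====
def pvGroup : PySem.Dict String Int :=
  PySem.Dict.ofList
    [("Aries", 0), ("Leo", 0), ("Sagittarius", 0),
     ("Gemini", 0), ("Libra", 0), ("Aquarius", 0),
     ("Taurus", 1), ("Virgo", 1), ("Capricorn", 1),
     ("Cancer", 1), ("Scorpio", 1), ("Pisces", 1)]

def are_compatible_signs_py_alt (s1 : String) (s2 : String) : Bool :=
  let g1 := pvGroup.get? s1
  let g2 := pvGroup.get? s2
  g1.isSome && g1 == g2

-- ===== PRECONDITION & SPEC =====
def Spec_are_compatible_signs_py (s1 : String) (s2 : String) (out : Bool) : Prop := out = are_compatible_signs_py_alt s1 s2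
instance (s1 : String) (s2 : String) (out : Bool) : Decidable (Spec_are_compatible_signs_py s1 s2 out) := by unfold Spec_are_compatible_signs_py; infer_instance

-- ===== CLAIM (what is proved, stated in full; the proofs are below) =====
def Claim_equal_are_compatible_signs_py : Prop := ∀ (s1 : String) (s2 : String), Dom_are_compatible_signs_py s1 s2 → Spec_are_compatible_signs_py s1 s2 (are_compatible_signs_py s1 s2)

-- ===== LEMMAS AND PROOFS =====

-- element name of A's scan → B's polarity group (proof-side bridge only)
def pvGrpOf : Option String → Option Int
  | some "Fire" => some 0
  | some "Air" => some 0
  | some "Earth" => some 1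
  | some "Water" => some 1
  | _ => none

set_option maxRecDepth 4096 in
lemma pv_link (s : String) :
    pvGroup.get? s = pvGrpOf ((pvElements.find? (fun p => p.2.contains s)).map (·.1)) := by
  by_cases h0 : s = "Aries"
  · subst h0; decide
  by_cases h1 : s = "Leo"
  · subst h1; decide
  by_cases h2 : s = "Sagittarius"
  · subst h2; decide
  by_cases h3 : s = "Taurus"
  · subst h3; decide
  by_cases h4 : s = "Virgo"
  · subst h4; decide
  by_cases h5 : s = "Capricorn"
  · subst h5; decide
  by_cases h6 : s = "Gemini"
  · subst h6; decide
  by_cases h7 : s = "Libra"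
  · subst h7; decide
  by_cases h8 : s = "Aquarius"
  · subst h8; decide
  by_cases h9 : s = "Cancer"
  · subst h9; decide
  by_cases h10 : s = "Scorpio"
  · subst h10; decide
  by_cases h11 : s = "Pisces"
  · subst h11; decide
  have hg : pvGroup = PySem.Dict.mk
      [("Aries", 0), ("Leo", 0), ("Sagittarius", 0),
       ("Gemini", 0), ("Libra", 0), ("Aquarius", 0),
       ("Taurus", 1), ("Virgo", 1), ("Capricorn", 1),
       ("Cancer", 1), ("Scorpio", 1), ("Pisces", 1)] := by decide
  rw [hg]
  simp only [PySem.Dict.get?_mk_cons,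
    beq_iff_eq, if_neg (Ne.symm h0), if_neg (Ne.symm h1), if_neg (Ne.symm h2),
    if_neg (Ne.symm h3), if_neg (Ne.symm h4), if_neg (Ne.symm h5),
    if_neg (Ne.symm h6), if_neg (Ne.symm h7), if_neg (Ne.symm h8),
    if_neg (Ne.symm h9), if_neg (Ne.symm h10), if_neg (Ne.symm h11)]
  simp [PySem.Dict.get?, pvElements, List.find?, pvGrpOf,
    h0, h1, h2, h3, h4, h5, h6, h7, h8, h9, h10, h11]

lemma pv_find_cases (s : String) :
    (pvElements.find? (fun p => p.2.contains s)).map (·.1) = none ∨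
    (pvElements.find? (fun p => p.2.contains s)).map (·.1) = some "Fire" ∨
    (pvElements.find? (fun p => p.2.contains s)).map (·.1) = some "Earth" ∨
    (pvElements.find? (fun p => p.2.contains s)).map (·.1) = some "Air" ∨
    (pvElements.find? (fun p => p.2.contains s)).map (·.1) = some "Water" := by
  cases h : pvElements.find? (fun p => p.2.contains s) with
  | none => simp
  | some x =>
    have hx := List.mem_of_find?_eq_some h
    simp only [pvElements, List.mem_cons, List.not_mem_nil, or_false] at hx
    rcases hx with rfl | rfl | rfl | rfl <;> simp

-- ===== VERDICT (by name: the statement is the Claim_ definition above) =====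
theorem are_compatible_signs_py_spec : Claim_equal_are_compatible_signs_py := by
  intro s1 s2 _
  unfold Spec_are_compatible_signs_py are_compatible_signs_py are_compatible_signs_py_alt
  rw [pv_link s1, pv_link s2]
  rcases pv_find_cases s1 with h1 | h1 | h1 | h1 | h1 <;>
    rcases pv_find_cases s2 with h2 | h2 | h2 | h2 | h2 <;>
      rw [h1, h2] <;> decide
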